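-- pv_equiv track=rewrite | github.com/TuubaLord/junction2025 | aku_dev.py | summarize_relations
-- ===== SOURCE A (Python) =====
-- def summarize_relations(results: list) -> dict:
--     """
--     Count overlaps, contradictions, and bloat in a list of relation records.
--
--     Metrics 'overlap' and 'contradiction' EXCLUDE bloat from the 'total_metric'
--     so you can evaluate only on substantive pairs.
--     """
--     counts = {"overlap": 0, "contradiction": 0, "bloat": 0}
--     for r in results:
--         rel = r.get("relation")
--         if rel in counts:
--             counts[rel] += 1
--
--     # Total number of pairs used for core metrics (exclude bloat)
--     counts["total_metric"] = counts["overlap"] + counts["contradiction"]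
--     # Total pairs including bloat (for sanity check)
--     counts["total_all"] = counts["total_metric"] + counts["bloat"]
--     return counts
-- ===== SOURCE B (Python) =====
-- def summarize_relations(results: list) -> dict:
--     """Divide-and-conquer: recursively tally (overlap, contradiction, bloat) triples
--     over halves of the list and combine by component-wise addition."""
--     def tally(lo, hi):
--         if hi - lo == 0:
--             return (0, 0, 0)
--         if hi - lo == 1:
--             rel = results[lo].get("relation")
--             return (int(rel == "overlap"), int(rel == "contradiction"), int(rel == "bloat"))
--         mid = (lo + hi) // 2
--         o1, c1, b1 = tally(lo, mid)
--         o2, c2, b2 = tally(mid, hi)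
--         return (o1 + o2, c1 + c2, b1 + b2)
--
--     overlap, contradiction, bloat = tally(0, len(results))
--     total_metric = overlap + contradiction
--     return {
--         "overlap": overlap,
--         "contradiction": contradiction,
--         "bloat": bloat,
--         "total_metric": total_metric,
--         "total_all": total_metric + bloat,
--     }
-- ===== Notes on version B (the rewrite author's own statement) =====
-- stated objective: alternative
-- what changed: Replaces A's single fused loop that mutates a counter dict per record with a divide-and-conquer recursion that splits the list in half, tallies each half into an (overlap, contradiction, bloat) triple, combines triples by addition, and builds the result dict once at the end.
import Mathlib
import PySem

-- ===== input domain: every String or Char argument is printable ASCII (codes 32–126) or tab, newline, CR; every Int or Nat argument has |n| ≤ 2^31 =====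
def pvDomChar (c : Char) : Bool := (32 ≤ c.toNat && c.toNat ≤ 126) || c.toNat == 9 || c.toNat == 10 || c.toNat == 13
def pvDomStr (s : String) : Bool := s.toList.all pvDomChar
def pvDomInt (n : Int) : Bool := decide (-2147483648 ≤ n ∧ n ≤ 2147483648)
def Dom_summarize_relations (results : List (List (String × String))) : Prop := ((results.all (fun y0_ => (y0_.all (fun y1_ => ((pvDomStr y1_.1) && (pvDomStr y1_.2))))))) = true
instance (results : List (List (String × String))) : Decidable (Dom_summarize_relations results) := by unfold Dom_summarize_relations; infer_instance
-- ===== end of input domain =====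

-- B replaces A's fused dict-mutating loop by a divide-and-conquer recursion that tallies
-- (overlap, contradiction, bloat) triples over halves; objective: alternative, same cost.


-- ===== PORT A =====
-- r.get("relation") on the record dict (exact: Python dict built from the pairs, lookup by get)
def pvRelOf (r : List (String × String)) : Option String :=
  (PySem.Dict.ofList r).get? "relation"

-- the body of A's for-loop: rel = r.get("relation"); if rel in counts: counts[rel] += 1
def pvStep (c : PySem.Dict String Int) (r : List (String × String)) : PySem.Dict String Int :=
  match pvRelOf r with
  | some rel => if c.contains rel then c.modify rel 0 (· + 1) else c
  | none => c

def summarize_relations (results : List (List (String × String))) : List (String × Int) :=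
  let counts : PySem.Dict String Int :=
    ((PySem.Dict.empty.insert "overlap" 0).insert "contradiction" 0).insert "bloat" 0
  let counts := results.foldl pvStep counts
  let counts := counts.insert "total_metric" (counts.getD "overlap" 0 + counts.getD "contradiction" 0)
  let counts := counts.insert "total_all" (counts.getD "total_metric" 0 + counts.getD "bloat" 0)
  counts.items

-- ===== PORT B =====
-- tally(lo, hi) of Source B, transcribed on the sublist results[lo:hi]: the two recursive
-- calls on index halves become calls on take/drop at mid = len // 2.
def pvTally (rs : List (List (String × String))) : Int × Int × Int :=
  if rs.length = 0 then (0, 0, 0)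
  else if rs.length = 1 then
    let rel := pvRelOf rs.headI
    ((if rel = some "overlap" then 1 else 0),
     (if rel = some "contradiction" then 1 else 0),
     (if rel = some "bloat" then 1 else 0))
  else
    let mid := rs.length / 2
    let t1 := pvTally (rs.take mid)
    let t2 := pvTally (rs.drop mid)
    (t1.1 + t2.1, t1.2.1 + t2.2.1, t1.2.2 + t2.2.2)
termination_by rs.length
decreasing_by
  · simp only [List.length_take]; omega
  · simp only [List.length_drop]; omega

def summarize_relations_alt (results : List (List (String × String))) : List (String × Int) :=
  let t := pvTally results
  let overlap := t.1
  let contradiction := t.2.1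
  let bloat := t.2.2
  let total_metric := overlap + contradiction
  [("overlap", overlap), ("contradiction", contradiction), ("bloat", bloat),
   ("total_metric", total_metric), ("total_all", total_metric + bloat)]

-- ===== PRECONDITION & SPEC =====
def Spec_summarize_relations (results : List (List (String × String))) (out : List (String × Int)) : Prop := out = summarize_relations_alt results
instance (results : List (List (String × String))) (out : List (String × Int)) : Decidable (Spec_summarize_relations results out) := by unfold Spec_summarize_relations; infer_instance

-- ===== CLAIM (what is proved, stated in full; the proofs are below) =====
def Claim_equal_summarize_relations : Prop := ∀ (results : List (List (String × String))), Dom_summarize_relations results → Spec_summarize_relations results (summarize_relations results)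

-- ===== LEMMAS AND PROOFS =====

lemma pvStep_none (c : PySem.Dict String Int) (r : List (String × String))
    (h : pvRelOf r = none) : pvStep c r = c := by
  simp [pvStep, h]

lemma pvStep_some (c : PySem.Dict String Int) (r : List (String × String)) (rel : String)
    (h : pvRelOf r = some rel) :
    pvStep c r = if c.contains rel then c.modify rel 0 (· + 1) else c := by
  simp [pvStep, h]

-- A's accumulation loop over a dict holding exactly the three category keys counts each category.
lemma pv_loop (results : List (List (String × String))) (a b c : Int) :
    results.foldl pvStep (PySem.Dict.mk [("overlap", a), ("contradiction", b), ("bloat", c)])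
    = PySem.Dict.mk [("overlap", a + ((results.map pvRelOf).count (some "overlap") : Int)),
        ("contradiction", b + ((results.map pvRelOf).count (some "contradiction") : Int)),
        ("bloat", c + ((results.map pvRelOf).count (some "bloat") : Int))] := by
  induction results generalizing a b c with
  | nil => simp
  | cons r rest ih =>
    simp only [List.foldl_cons, List.map_cons, List.count_cons]
    cases hrel : pvRelOf r with
    | none =>
      rw [pvStep_none _ _ hrel, ih]
      simp
    | some rel =>
      rw [pvStep_some _ _ _ hrel]
      by_cases h1 : rel = "overlap"
      · subst h1
        rw [if_pos (by simp [PySem.Dict.contains]),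
          show (PySem.Dict.mk [("overlap", a), ("contradiction", b), ("bloat", c)]).modify "overlap" 0 (· + 1)
            = PySem.Dict.mk [("overlap", a + 1), ("contradiction", b), ("bloat", c)] from by
            simp [PySem.Dict.modify, PySem.Dict.contains, PySem.Dict.getD, PySem.Dict.get?, PySem.Dict.insert], ih]
        congr 2; simp [add_assoc, add_comm]
      · by_cases h2 : rel = "contradiction"
        · subst h2
          rw [if_pos (by simp [PySem.Dict.contains]),
            show (PySem.Dict.mk [("overlap", a), ("contradiction", b), ("bloat", c)]).modify "contradiction" 0 (· + 1)
              = PySem.Dict.mk [("overlap", a), ("contradiction", b + 1), ("bloat", c)] from by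
              simp [PySem.Dict.modify, PySem.Dict.contains, PySem.Dict.getD, PySem.Dict.get?, PySem.Dict.insert], ih]
          congr 2; simp [add_assoc, add_comm]
        · by_cases h3 : rel = "bloat"
          · subst h3
            rw [if_pos (by simp [PySem.Dict.contains]),
              show (PySem.Dict.mk [("overlap", a), ("contradiction", b), ("bloat", c)]).modify "bloat" 0 (· + 1)
                = PySem.Dict.mk [("overlap", a), ("contradiction", b), ("bloat", c + 1)] from by
                simp [PySem.Dict.modify, PySem.Dict.contains, PySem.Dict.getD, PySem.Dict.get?, PySem.Dict.insert], ih]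
            congr 2; simp [add_assoc, add_comm]
          · rw [if_neg (by simp [PySem.Dict.contains, h1, h2, h3, Ne.symm]), ih]
            congr 2 <;> simp [h1, h2, h3]

-- B's divide-and-conquer tally computes the three category counts.
lemma pvTally_eq (rs : List (List (String × String))) :
    pvTally rs =
      (((rs.map pvRelOf).count (some "overlap") : Int),
       ((rs.map pvRelOf).count (some "contradiction") : Int),
       ((rs.map pvRelOf).count (some "bloat") : Int)) := by
  induction hn : rs.length using Nat.strong_induction_on generalizing rs with
  | _ n ih =>
    rw [pvTally]
    by_cases h0 : rs.length = 0
    · rw [if_pos h0]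
      rw [List.length_eq_zero_iff] at h0; subst h0; simp
    · rw [if_neg h0]
      by_cases h1 : rs.length = 1
      · rw [if_pos h1]
        obtain ⟨r, rfl⟩ := List.length_eq_one_iff.mp h1
        simp only [List.headI, List.map_cons, List.map_nil]
        by_cases o : pvRelOf r = some "overlap" <;>
          by_cases c : pvRelOf r = some "contradiction" <;>
            by_cases b : pvRelOf r = some "bloat" <;>
              simp_all [List.count_nil] <;> omega
      · rw [if_neg h1]
        have hlen : 2 ≤ rs.length := by omega
        have ht := ih ((rs.take (rs.length / 2)).length)
          (by simp only [List.length_take]; omega) _ rfl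
        have hd := ih ((rs.drop (rs.length / 2)).length)
          (by simp only [List.length_drop]; subst hn; omega) _ rfl
        have hsplit : ∀ (x : Option String),
            ((rs.map pvRelOf).count x : Int)
              = ((rs.map pvRelOf).take (rs.length / 2)).count x
                + ((rs.map pvRelOf).drop (rs.length / 2)).count x := by
          intro x
          conv_lhs => rw [← List.take_append_drop (rs.length / 2) (rs.map pvRelOf)]
          rw [List.count_append]; push_cast; ring
        simp only [ht, hd, List.map_take, List.map_drop, Prod.mk.injEq]
        exact ⟨(hsplit _).symm, (hsplit _).symm, (hsplit _).symm⟩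

theorem summarize_relations_spec : Claim_equal_summarize_relations := by
  unfold Claim_equal_summarize_relations
  intro results _
  unfold Spec_summarize_relations summarize_relations summarize_relations_alt
  have hinit : ((PySem.Dict.empty.insert "overlap" (0 : Int)).insert "contradiction" 0).insert "bloat" 0
      = PySem.Dict.mk [("overlap", 0), ("contradiction", 0), ("bloat", 0)] := rfl
  simp only [hinit, pv_loop, pvTally_eq]
  simp [PySem.Dict.insert, PySem.Dict.getD, PySem.Dict.get?]
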